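-- pv_equiv track=rewrite | github.com/MankyDanky/leetcode-practice | max_area_square_hold_fence.py | maximizeSquareArea
-- ===== SOURCE A (Python) =====
-- from typing import List
--
-- def maximizeSquareArea(m: int, n: int, hFences: List[int], vFences: List[int]) -> int:
--     inH = set(hFences)
--     inV = set(vFences)
--     inH.add(1)
--     inV.add(1)
--     inH.add(m)
--     inV.add(n)
--     res = -1
--
--     diagonalMax = {}
--     diagonalMin = {}
--
--     MOD = 1000000007
--
--     for h in inH:
--         for v in inV:
--             d = h - v
--             if d in diagonalMax:
--                 if h > diagonalMax[d][0]:
--                     diagonalMax[d] = (h, v)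
--             else:
--                 diagonalMax[d] = (h, v)
--
--             if d in diagonalMin:
--                 if h < diagonalMin[d][0]:
--                     diagonalMin[d] = (h, v)
--             else:
--                 diagonalMin[d] = (h, v)
--
--     res = 0
--     for d in diagonalMax:
--         l = diagonalMax[d][0] - diagonalMin[d][0]
--         res = max(res, l * l)
--     return res % MOD if res != 0 else -1
-- ===== SOURCE B (Python) =====
-- from typing import List
--
-- def maximizeSquareArea(m: int, n: int, hFences: List[int], vFences: List[int]) -> int:
--     MOD = 1000000007
--     hs = set(hFences); hs.add(1); hs.add(m)
--     vs = set(vFences); vs.add(1); vs.add(n)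
--     hGaps = {b - a for a in hs for b in hs if b > a}
--     vGaps = {b - a for a in vs for b in vs if b > a}
--     s = max((g for g in hGaps if g in vGaps), default=0)
--     return s * s % MOD if s else -1
-- ===== Notes on version B (the rewrite author's own statement) =====
-- stated objective: simpler
-- what changed: Replaces A's diagonal-keyed pass over all H-by-V fence pairs maintaining per-diagonal max/min dictionaries with two independent pairwise-difference sets (horizontal gaps, vertical gaps) whose largest common element is the square side.
import Mathlib
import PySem

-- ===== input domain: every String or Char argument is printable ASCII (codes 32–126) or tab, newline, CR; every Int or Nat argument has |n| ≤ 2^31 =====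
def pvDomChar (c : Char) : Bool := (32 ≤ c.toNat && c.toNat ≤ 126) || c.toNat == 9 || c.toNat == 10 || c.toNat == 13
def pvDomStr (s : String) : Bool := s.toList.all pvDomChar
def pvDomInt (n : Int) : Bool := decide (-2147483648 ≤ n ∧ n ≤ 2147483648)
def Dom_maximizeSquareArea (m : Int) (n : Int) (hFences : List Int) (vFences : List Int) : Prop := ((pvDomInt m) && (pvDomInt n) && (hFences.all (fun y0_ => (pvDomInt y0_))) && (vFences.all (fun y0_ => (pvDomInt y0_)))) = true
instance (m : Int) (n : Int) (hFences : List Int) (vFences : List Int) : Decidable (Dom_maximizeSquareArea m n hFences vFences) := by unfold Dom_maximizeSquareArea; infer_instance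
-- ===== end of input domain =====

-- B replaces A's diagonal-keyed max/min dictionaries over all H×V fence pairs by the largest
-- common element of the two pairwise-gap sets; objective: simpler.

-- ===== PORT A =====
-- the body of A's double loop for diagonalMax: if d in dict → replace on strictly greater h, else insert
-- (diagonalMax[d][0] is read with getD; the default is never used since the branch requires `contains`)
def pvUpdMax (dm : PySem.Dict Int (Int × Int)) (h v : Int) : PySem.Dict Int (Int × Int) :=
  let d := h - v
  if dm.contains d then
    (if h > (dm.getD d (0, 0)).1 then dm.insert d (h, v) else dm)
  else dm.insert d (h, v)

-- the body for diagonalMin: replace on strictly smaller h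
def pvUpdMin (dm : PySem.Dict Int (Int × Int)) (h v : Int) : PySem.Dict Int (Int × Int) :=
  let d := h - v
  if dm.contains d then
    (if h < (dm.getD d (0, 0)).1 then dm.insert d (h, v) else dm)
  else dm.insert d (h, v)

def maximizeSquareArea (m : Int) (n : Int) (hFences : List Int) (vFences : List Int) : Int :=
  let inH : PySem.Set Int := PySem.Set.add (PySem.Set.add (PySem.Set.ofList hFences) 1) m
  let inV : PySem.Set Int := PySem.Set.add (PySem.Set.add (PySem.Set.ofList vFences) 1) n
  let MOD : Int := 1000000007
  -- for h in inH: for v in inV: update both dicts  (res = -1 before this loop is dead: res is reset to 0)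
  let st := inH.foldl (fun st h => inV.foldl (fun st v => (pvUpdMax st.1 h v, pvUpdMin st.2 h v)) st)
      ((PySem.Dict.empty : PySem.Dict Int (Int × Int)), (PySem.Dict.empty : PySem.Dict Int (Int × Int)))
  -- for d in diagonalMax: res = max(res, l*l)  (diagonalMin[d] always exists; read with getD)
  let res := st.1.keys.foldl (fun res d =>
      max res (((st.1.getD d (0, 0)).1 - (st.2.getD d (0, 0)).1) * ((st.1.getD d (0, 0)).1 - (st.2.getD d (0, 0)).1))) 0
  if res ≠ 0 then PySem.Int.mod res MOD else -1

-- ===== PORT B =====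
def maximizeSquareArea_alt (m : Int) (n : Int) (hFences : List Int) (vFences : List Int) : Int :=
  let MOD : Int := 1000000007
  let hs : PySem.Set Int := PySem.Set.add (PySem.Set.add (PySem.Set.ofList hFences) 1) m
  let vs : PySem.Set Int := PySem.Set.add (PySem.Set.add (PySem.Set.ofList vFences) 1) n
  -- {b - a for a in hs for b in hs if b > a}  (and the same for vs)
  let hGaps : PySem.Set Int :=
    PySem.Set.ofList (hs.flatMap (fun a => hs.filterMap (fun b => if b > a then some (b - a) else none)))
  let vGaps : PySem.Set Int :=
    PySem.Set.ofList (vs.flatMap (fun a => vs.filterMap (fun b => if b > a then some (b - a) else none)))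
  -- s = max((g for g in hGaps if g in vGaps), default=0)
  let s := match PySem.List.max? (hGaps.filter (fun g => PySem.Set.contains vGaps g)) (fun g => g) with
    | some g => g
    | none => 0
  if s ≠ 0 then PySem.Int.mod (s * s) MOD else -1

-- ===== PRECONDITION & SPEC =====
def Spec_maximizeSquareArea (m : Int) (n : Int) (hFences : List Int) (vFences : List Int) (out : Int) : Prop := out = maximizeSquareArea_alt m n hFences vFences
instance (m : Int) (n : Int) (hFences : List Int) (vFences : List Int) (out : Int) : Decidable (Spec_maximizeSquareArea m n hFences vFences out) := by unfold Spec_maximizeSquareArea; infer_instance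

-- ===== CLAIM (what is proved, stated in full; the proofs are below) =====
def Claim_equal_maximizeSquareArea : Prop := ∀ (m : Int) (n : Int) (hFences : List Int) (vFences : List Int), Dom_maximizeSquareArea m n hFences vFences → Spec_maximizeSquareArea m n hFences vFences (maximizeSquareArea m n hFences vFences)

-- ===== LEMMAS AND PROOFS =====

-- the H×V pair list A's nested loop walks through
def pvP (hs vs : List Int) : List (Int × Int) := hs.flatMap (fun h => vs.map (fun v => (h, v)))

def pvDMax (P : List (Int × Int)) : PySem.Dict Int (Int × Int) :=
  P.foldl (fun dm p => pvUpdMax dm p.1 p.2) PySem.Dict.empty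

def pvDMin (P : List (Int × Int)) : PySem.Dict Int (Int × Int) :=
  P.foldl (fun dm p => pvUpdMin dm p.1 p.2) PySem.Dict.empty

lemma pvMem_P {hs vs : List Int} {p : Int × Int} : p ∈ pvP hs vs ↔ p.1 ∈ hs ∧ p.2 ∈ vs := by
  cases p with
  | mk a b =>
    simp only [pvP, List.mem_flatMap, List.mem_map, Prod.mk.injEq]
    constructor
    · rintro ⟨h, hh, v, hv, rfl, rfl⟩; exact ⟨hh, hv⟩
    · rintro ⟨hh, hv⟩; exact ⟨a, hh, b, hv, rfl, rfl⟩

lemma pvFoldl_nested {σ : Type} (hs vs : List Int) (g : σ → Int → Int → σ) (init : σ) :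
    hs.foldl (fun st h => vs.foldl (fun st v => g st h v) st) init
      = (pvP hs vs).foldl (fun st p => g st p.1 p.2) init := by
  induction hs generalizing init with
  | nil => rfl
  | cons h t ih => simp only [pvP, List.flatMap_cons, List.foldl_append, List.foldl_map,
      List.foldl_cons] at *; rw [ih]

lemma pvFoldl_pair {α : Type} (P : List α) (f g : PySem.Dict Int (Int × Int) → α → PySem.Dict Int (Int × Int))
    (a b : PySem.Dict Int (Int × Int)) :
    P.foldl (fun st p => (f st.1 p, g st.2 p)) (a, b) = (P.foldl f a, P.foldl g b) := by
  induction P generalizing a b with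
  | nil => rfl
  | cons p t ih => simp only [List.foldl_cons, ih]

lemma pvUpdMax_eq (dm : PySem.Dict Int (Int × Int)) (h v : Int) :
    pvUpdMax dm h v = if dm.contains (h - v) then
        (if h > (dm.getD (h - v) (0, 0)).1 then dm.insert (h - v) (h, v) else dm)
      else dm.insert (h - v) (h, v) := rfl

lemma pvUpdMin_eq (dm : PySem.Dict Int (Int × Int)) (h v : Int) :
    pvUpdMin dm h v = if dm.contains (h - v) then
        (if h < (dm.getD (h - v) (0, 0)).1 then dm.insert (h - v) (h, v) else dm)
      else dm.insert (h - v) (h, v) := rfl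

lemma pvUpdMax_get?_none (dm : PySem.Dict Int (Int × Int)) {h v : Int} (d : Int)
    (hg : dm.get? (h - v) = none) :
    (pvUpdMax dm h v).get? d = if d = h - v then some (h, v) else dm.get? d := by
  rw [pvUpdMax_eq, PySem.Dict.contains_eq_isSome_get?, hg]
  simp [PySem.Dict.get?_insert]

lemma pvUpdMax_get?_some (dm : PySem.Dict Int (Int × Int)) {h v : Int} (d : Int) {r : Int × Int}
    (hg : dm.get? (h - v) = some r) :
    (pvUpdMax dm h v).get? d =
      if d = h - v then (if r.1 < h then some (h, v) else some r) else dm.get? d := by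
  rw [pvUpdMax_eq, PySem.Dict.contains_eq_isSome_get?, hg]
  rw [PySem.Dict.getD_eq_get?_getD, hg]
  by_cases hlt : r.1 < h
  · simp only [Option.isSome_some, if_true, Option.getD_some, gt_iff_lt, hlt,
      PySem.Dict.get?_insert]
  · simp only [Option.isSome_some, if_true, Option.getD_some, gt_iff_lt, hlt, if_false]
    by_cases hd : d = h - v
    · subst hd; simp [hg]
    · simp [hd]

lemma pvUpdMin_get?_none (dm : PySem.Dict Int (Int × Int)) {h v : Int} (d : Int)
    (hg : dm.get? (h - v) = none) :
    (pvUpdMin dm h v).get? d = if d = h - v then some (h, v) else dm.get? d := by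
  rw [pvUpdMin_eq, PySem.Dict.contains_eq_isSome_get?, hg]
  simp [PySem.Dict.get?_insert]

lemma pvUpdMin_get?_some (dm : PySem.Dict Int (Int × Int)) {h v : Int} (d : Int) {r : Int × Int}
    (hg : dm.get? (h - v) = some r) :
    (pvUpdMin dm h v).get? d =
      if d = h - v then (if h < r.1 then some (h, v) else some r) else dm.get? d := by
  rw [pvUpdMin_eq, PySem.Dict.contains_eq_isSome_get?, hg]
  rw [PySem.Dict.getD_eq_get?_getD, hg]
  by_cases hlt : h < r.1
  · simp only [Option.isSome_some, if_true, Option.getD_some, hlt, PySem.Dict.get?_insert]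
  · simp only [Option.isSome_some, if_true, Option.getD_some, hlt, if_false]
    by_cases hd : d = h - v
    · subst hd; simp [hg]
    · simp [hd]

-- invariant of the diagonalMax loop: each stored entry is the pair with maximal h on its diagonal
lemma pvDMax_inv (P : List (Int × Int)) :
    (∀ d h v, (pvDMax P).get? d = some (h, v) →
      (h, v) ∈ P ∧ h - v = d ∧ ∀ q ∈ P, q.1 - q.2 = d → q.1 ≤ h)
    ∧ ∀ p ∈ P, ((pvDMax P).get? (p.1 - p.2)).isSome := by
  induction P using List.reverseRecOn with
  | nil => exact ⟨fun d h v hd => by simp [pvDMax, PySem.Dict.get?_empty] at hd, by simp⟩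
  | append_singleton P p ih =>
    have hfold : pvDMax (P ++ [p]) = pvUpdMax (pvDMax P) p.1 p.2 := by
      simp [pvDMax, List.foldl_append]
    obtain ⟨ih1, ih2⟩ := ih
    have memP : ∀ q : Int × Int, q ∈ P → q ∈ P ++ [p] := fun q hq => List.mem_append.mpr (Or.inl hq)
    constructor
    · intro d h v hd
      rw [hfold] at hd
      cases hg : (pvDMax P).get? (p.1 - p.2) with
      | none =>
        rw [pvUpdMax_get?_none _ _ hg] at hd
        by_cases hdiag : d = p.1 - p.2
        · rw [if_pos hdiag] at hd
          obtain ⟨rfl, rfl⟩ : h = p.1 ∧ v = p.2 := by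
            simpa [Prod.ext_iff] using (Option.some_injective _ hd).symm
          refine ⟨by simp, by omega, ?_⟩
          intro q hq hqd
          rcases List.mem_append.mp hq with hq | hq
          · exact absurd (ih2 q hq) (by
              have : q.1 - q.2 = p.1 - p.2 := by omega
              rw [this, hg]; simp)
          · simp at hq; subst hq; omega
        · rw [if_neg hdiag] at hd
          obtain ⟨h1, h2, h3⟩ := ih1 d h v hd
          refine ⟨memP _ h1, h2, ?_⟩
          intro q hq hqd
          rcases List.mem_append.mp hq with hq | hq
          · exact h3 q hq hqd
          · simp at hq; subst hq; omega
      | some r =>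
        rw [pvUpdMax_get?_some _ _ hg] at hd
        obtain ⟨hr1, hr2, hr3⟩ := ih1 (p.1 - p.2) r.1 r.2 (by rw [hg])
        by_cases hdiag : d = p.1 - p.2
        · rw [if_pos hdiag] at hd
          by_cases hlt : r.1 < p.1
          · rw [if_pos hlt] at hd
            obtain ⟨rfl, rfl⟩ : h = p.1 ∧ v = p.2 := by
              simpa [Prod.ext_iff] using (Option.some_injective _ hd).symm
            refine ⟨by simp, by omega, ?_⟩
            intro q hq hqd
            rcases List.mem_append.mp hq with hq | hq
            · have := hr3 q hq (by omega); omega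
            · simp at hq; subst hq; omega
          · rw [if_neg hlt] at hd
            obtain ⟨rfl, rfl⟩ : h = r.1 ∧ v = r.2 := by
              simpa [Prod.ext_iff] using (Option.some_injective _ hd).symm
            refine ⟨memP _ hr1, by omega, ?_⟩
            intro q hq hqd
            rcases List.mem_append.mp hq with hq | hq
            · exact hr3 q hq (by omega)
            · simp at hq; subst hq; omega
        · rw [if_neg hdiag] at hd
          obtain ⟨h1, h2, h3⟩ := ih1 d h v hd
          refine ⟨memP _ h1, h2, ?_⟩
          intro q hq hqd
          rcases List.mem_append.mp hq with hq | hq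
          · exact h3 q hq hqd
          · simp at hq; subst hq; omega
    · intro q hq
      rw [hfold]
      cases hg : (pvDMax P).get? (p.1 - p.2) with
      | none =>
        rw [pvUpdMax_get?_none _ _ hg]
        rcases List.mem_append.mp hq with hq | hq
        · by_cases hdiag : q.1 - q.2 = p.1 - p.2
          · rw [if_pos hdiag]; simp
          · rw [if_neg hdiag]; exact ih2 q hq
        · simp at hq; subst hq; simp
      | some r =>
        rw [pvUpdMax_get?_some _ _ hg]
        rcases List.mem_append.mp hq with hq | hq
        · by_cases hdiag : q.1 - q.2 = p.1 - p.2
          · rw [if_pos hdiag]; split <;> simp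
          · rw [if_neg hdiag]; exact ih2 q hq
        · simp at hq; subst hq; rw [if_pos rfl]; split <;> rfl

lemma pvDMin_inv (P : List (Int × Int)) :
    (∀ d h v, (pvDMin P).get? d = some (h, v) →
      (h, v) ∈ P ∧ h - v = d ∧ ∀ q ∈ P, q.1 - q.2 = d → h ≤ q.1)
    ∧ ∀ p ∈ P, ((pvDMin P).get? (p.1 - p.2)).isSome := by
  induction P using List.reverseRecOn with
  | nil => exact ⟨fun d h v hd => by simp [pvDMin, PySem.Dict.get?_empty] at hd, by simp⟩
  | append_singleton P p ih =>
    have hfold : pvDMin (P ++ [p]) = pvUpdMin (pvDMin P) p.1 p.2 := by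
      simp [pvDMin, List.foldl_append]
    obtain ⟨ih1, ih2⟩ := ih
    have memP : ∀ q : Int × Int, q ∈ P → q ∈ P ++ [p] := fun q hq => List.mem_append.mpr (Or.inl hq)
    constructor
    · intro d h v hd
      rw [hfold] at hd
      cases hg : (pvDMin P).get? (p.1 - p.2) with
      | none =>
        rw [pvUpdMin_get?_none _ _ hg] at hd
        by_cases hdiag : d = p.1 - p.2
        · rw [if_pos hdiag] at hd
          obtain ⟨rfl, rfl⟩ : h = p.1 ∧ v = p.2 := by
            simpa [Prod.ext_iff] using (Option.some_injective _ hd).symm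
          refine ⟨by simp, by omega, ?_⟩
          intro q hq hqd
          rcases List.mem_append.mp hq with hq | hq
          · exact absurd (ih2 q hq) (by
              have : q.1 - q.2 = p.1 - p.2 := by omega
              rw [this, hg]; simp)
          · simp at hq; subst hq; omega
        · rw [if_neg hdiag] at hd
          obtain ⟨h1, h2, h3⟩ := ih1 d h v hd
          refine ⟨memP _ h1, h2, ?_⟩
          intro q hq hqd
          rcases List.mem_append.mp hq with hq | hq
          · exact h3 q hq hqd
          · simp at hq; subst hq; omega
      | some r =>
        rw [pvUpdMin_get?_some _ _ hg] at hd
        obtain ⟨hr1, hr2, hr3⟩ := ih1 (p.1 - p.2) r.1 r.2 (by rw [hg])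
        by_cases hdiag : d = p.1 - p.2
        · rw [if_pos hdiag] at hd
          by_cases hlt : p.1 < r.1
          · rw [if_pos hlt] at hd
            obtain ⟨rfl, rfl⟩ : h = p.1 ∧ v = p.2 := by
              simpa [Prod.ext_iff] using (Option.some_injective _ hd).symm
            refine ⟨by simp, by omega, ?_⟩
            intro q hq hqd
            rcases List.mem_append.mp hq with hq | hq
            · have := hr3 q hq (by omega); omega
            · simp at hq; subst hq; omega
          · rw [if_neg hlt] at hd
            obtain ⟨rfl, rfl⟩ : h = r.1 ∧ v = r.2 := by
              simpa [Prod.ext_iff] using (Option.some_injective _ hd).symm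
            refine ⟨memP _ hr1, by omega, ?_⟩
            intro q hq hqd
            rcases List.mem_append.mp hq with hq | hq
            · exact hr3 q hq (by omega)
            · simp at hq; subst hq; omega
        · rw [if_neg hdiag] at hd
          obtain ⟨h1, h2, h3⟩ := ih1 d h v hd
          refine ⟨memP _ h1, h2, ?_⟩
          intro q hq hqd
          rcases List.mem_append.mp hq with hq | hq
          · exact h3 q hq hqd
          · simp at hq; subst hq; omega
    · intro q hq
      rw [hfold]
      cases hg : (pvDMin P).get? (p.1 - p.2) with
      | none =>
        rw [pvUpdMin_get?_none _ _ hg]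
        rcases List.mem_append.mp hq with hq | hq
        · by_cases hdiag : q.1 - q.2 = p.1 - p.2
          · rw [if_pos hdiag]; simp
          · rw [if_neg hdiag]; exact ih2 q hq
        · simp at hq; subst hq; simp
      | some r =>
        rw [pvUpdMin_get?_some _ _ hg]
        rcases List.mem_append.mp hq with hq | hq
        · by_cases hdiag : q.1 - q.2 = p.1 - p.2
          · rw [if_pos hdiag]; split <;> simp
          · rw [if_neg hdiag]; exact ih2 q hq
        · simp at hq; subst hq; rw [if_pos rfl]; split <;> rfl

lemma pvFoldl_max_le {t : List Int} {a b : Int} (ha : a ≤ b) (h : ∀ y ∈ t, y ≤ b) :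
    t.foldl max a ≤ b := by
  induction t generalizing a with
  | nil => exact ha
  | cons x xs ih =>
    exact ih (max_le ha (h x List.mem_cons_self)) (fun y hy => h y (List.mem_cons_of_mem _ hy))

-- membership in a pairwise-gap set
lemma pvMem_gaps (xs : List Int) (g : Int) :
    g ∈ PySem.Set.ofList (xs.flatMap (fun a => xs.filterMap (fun b => if b > a then some (b - a) else none)))
      ↔ ∃ a ∈ xs, ∃ b ∈ xs, a < b ∧ b - a = g := by
  rw [PySem.Set.mem_ofList, List.mem_flatMap]
  constructor
  · rintro ⟨a, ha, hg⟩
    rw [List.mem_filterMap] at hg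
    obtain ⟨b, hb, hbg⟩ := hg
    by_cases hab : b > a
    · rw [if_pos hab] at hbg
      exact ⟨a, ha, b, hb, hab, by injection hbg⟩
    · rw [if_neg hab] at hbg; cases hbg
  · rintro ⟨a, ha, b, hb, hab, rfl⟩
    exact ⟨a, ha, List.mem_filterMap.mpr ⟨b, hb, by rw [if_pos hab]⟩⟩

-- the side B computes
def pvS (hs vs : List Int) : Int :=
  match PySem.List.max?
      ((PySem.Set.ofList (hs.flatMap (fun a => hs.filterMap (fun b => if b > a then some (b - a) else none)))).filter
        (fun g => PySem.Set.contains (PySem.Set.ofList (vs.flatMap (fun a => vs.filterMap (fun b => if b > a then some (b - a) else none)))) g))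
      (fun g => g) with
  | some g => g
  | none => 0

-- a common gap of hs and vs
def pvCommon (hs vs : List Int) (g : Int) : Prop :=
  (∃ a ∈ hs, ∃ b ∈ hs, a < b ∧ b - a = g) ∧ (∃ a ∈ vs, ∃ b ∈ vs, a < b ∧ b - a = g)

lemma pvMem_common_list (hs vs : List Int) (g : Int) :
    g ∈ ((PySem.Set.ofList (hs.flatMap (fun a => hs.filterMap (fun b => if b > a then some (b - a) else none)))).filter
        (fun g => PySem.Set.contains (PySem.Set.ofList (vs.flatMap (fun a => vs.filterMap (fun b => if b > a then some (b - a) else none)))) g))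
      ↔ pvCommon hs vs g := by
  rw [List.mem_filter, pvCommon]
  constructor
  · rintro ⟨h1, h2⟩
    exact ⟨(pvMem_gaps hs g).mp h1, (pvMem_gaps vs g).mp ((PySem.Set.contains_iff _ _).mp h2)⟩
  · rintro ⟨h1, h2⟩
    exact ⟨(pvMem_gaps hs g).mpr h1, (PySem.Set.contains_iff _ _).mpr ((pvMem_gaps vs g).mpr h2)⟩

lemma pvS_spec (hs vs : List Int) :
    (pvS hs vs = 0 ∧ ∀ g, ¬ pvCommon hs vs g) ∨
    (0 < pvS hs vs ∧ pvCommon hs vs (pvS hs vs) ∧ ∀ g, pvCommon hs vs g → g ≤ pvS hs vs) := by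
  unfold pvS
  cases hm : PySem.List.max?
      ((PySem.Set.ofList (hs.flatMap (fun a => hs.filterMap (fun b => if b > a then some (b - a) else none)))).filter
        (fun g => PySem.Set.contains (PySem.Set.ofList (vs.flatMap (fun a => vs.filterMap (fun b => if b > a then some (b - a) else none)))) g))
      (fun g => g) with
  | none =>
    left
    refine ⟨rfl, fun g hg => ?_⟩
    have := (PySem.List.max?_eq_none_iff _ _).mp hm
    have hmem := (pvMem_common_list hs vs g).mpr hg
    rw [this] at hmem
    cases hmem
  | some g =>
    right
    have hmem := (pvMem_common_list hs vs g).mp (PySem.List.max?_mem hm)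
    have hpos : 0 < g := by
      obtain ⟨⟨a, _, b, _, hab, hba⟩, _⟩ := hmem
      omega
    refine ⟨hpos, hmem, fun y hy => ?_⟩
    exact PySem.List.max?_isMax hm y ((pvMem_common_list hs vs y).mpr hy)

lemma pvDMax_def (P : List (Int × Int)) :
    P.foldl (fun dm p => pvUpdMax dm p.1 p.2) PySem.Dict.empty = pvDMax P := rfl

lemma pvDMin_def (P : List (Int × Int)) :
    P.foldl (fun dm p => pvUpdMin dm p.1 p.2) PySem.Dict.empty = pvDMin P := rfl

lemma pvS_def (hs vs : List Int) :
    (match PySem.List.max?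
      ((PySem.Set.ofList (hs.flatMap (fun a => hs.filterMap (fun b => if b > a then some (b - a) else none)))).filter
        (fun g => PySem.Set.contains (PySem.Set.ofList (vs.flatMap (fun a => vs.filterMap (fun b => if b > a then some (b - a) else none)))) g))
      (fun g => g) with
    | some g => g
    | none => 0) = pvS hs vs := rfl

-- the area-loop value of A equals the square of B's side
lemma pvCore (hs vs : List Int) :
    (pvDMax (pvP hs vs)).keys.foldl (fun res d =>
        max res ((((pvDMax (pvP hs vs)).getD d (0, 0)).1 - ((pvDMin (pvP hs vs)).getD d (0, 0)).1) *
          (((pvDMax (pvP hs vs)).getD d (0, 0)).1 - ((pvDMin (pvP hs vs)).getD d (0, 0)).1))) 0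
      = pvS hs vs * pvS hs vs := by
  obtain ⟨maxI, maxS⟩ := pvDMax_inv (pvP hs vs)
  obtain ⟨minI, minS⟩ := pvDMin_inv (pvP hs vs)
  set P := pvP hs vs with hP
  set DM := pvDMax P with hDM
  set Dm := pvDMin P with hDm
  set s := pvS hs vs with hsdef
  set f : Int → Int := fun d => (DM.getD d (0, 0)).1 - (Dm.getD d (0, 0)).1 with hf
  show DM.keys.foldl (fun res d => max res (f d * f d)) 0 = s * s
  rw [show (List.foldl (fun res d => max res (f d * f d)) 0 DM.keys)
      = List.foldl max 0 (DM.keys.map (fun d => f d * f d)) from List.foldl_map.symm]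
  have key_bound : ∀ d ∈ DM.keys, f d * f d ≤ s * s := by
    intro d hd
    have hc : (DM.get? d).isSome := by
      rw [← PySem.Dict.contains_eq_isSome_get?]
      exact (PySem.Dict.contains_iff_mem_keys DM d).mpr hd
    obtain ⟨r, hr⟩ := Option.isSome_iff_exists.mp hc
    obtain ⟨hrP, hrd, hrmax⟩ := maxI d r.1 r.2 (by rw [hr])
    have hms : (Dm.get? d).isSome := by
      have := minS (r.1, r.2) hrP
      simpa [hrd] using this
    obtain ⟨t, ht⟩ := Option.isSome_iff_exists.mp hms
    obtain ⟨htP, htd, htmin⟩ := minI d t.1 t.2 (by rw [ht])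
    have hfd : f d = r.1 - t.1 := by
      simp [hf, PySem.Dict.getD_of_get?_eq_some _ _ hr, PySem.Dict.getD_of_get?_eq_some _ _ ht]
    have hle : t.1 ≤ r.1 := hrmax (t.1, t.2) htP htd
    by_cases hzero : r.1 - t.1 = 0
    · rw [hfd, hzero]
      simpa using mul_self_nonneg s
    · have hcommon : pvCommon hs vs (r.1 - t.1) := by
        refine ⟨⟨t.1, (pvMem_P.mp htP).1, r.1, (pvMem_P.mp hrP).1, by omega, rfl⟩,
          ⟨t.2, (pvMem_P.mp htP).2, r.2, (pvMem_P.mp hrP).2, by omega, by omega⟩⟩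
      rcases pvS_spec hs vs with ⟨hz, hnone⟩ | ⟨hpos, _, hmax⟩
      · exact absurd hcommon (hnone _)
      · have hle2 : r.1 - t.1 ≤ s := hmax _ hcommon
        rw [hfd]
        exact mul_self_le_mul_self (by omega) hle2
  have upper : (DM.keys.map (fun d => f d * f d)).foldl max 0 ≤ s * s := by
    refine pvFoldl_max_le (mul_self_nonneg s) ?_
    intro y hy
    obtain ⟨d, hd, rfl⟩ := List.mem_map.mp hy
    exact key_bound d hd
  have lower : s * s ≤ (DM.keys.map (fun d => f d * f d)).foldl max 0 := by
    rcases pvS_spec hs vs with ⟨hz, _⟩ | ⟨hpos, hcom, _⟩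
    · rw [hsdef, hz]
      simpa using (PySem.List.le_foldl_max (DM.keys.map (fun d => f d * f d)) 0).1
    · obtain ⟨⟨a, ha, b, hb, hab, hba⟩, ⟨c, hc, e, he, hce, hec⟩⟩ := hcom
      have hpP : ((a, c) : Int × Int) ∈ P := pvMem_P.mpr ⟨ha, hc⟩
      have hqP : ((b, e) : Int × Int) ∈ P := pvMem_P.mpr ⟨hb, he⟩
      have hMs : (DM.get? (a - c)).isSome := maxS (a, c) hpP
      obtain ⟨r, hr⟩ := Option.isSome_iff_exists.mp hMs
      obtain ⟨hrP, hrd, hrmax⟩ := maxI (a - c) r.1 r.2 (by rw [hr])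
      have hms : (Dm.get? (a - c)).isSome := minS (a, c) hpP
      obtain ⟨t, ht⟩ := Option.isSome_iff_exists.mp hms
      obtain ⟨htP, htd, htmin⟩ := minI (a - c) t.1 t.2 (by rw [ht])
      have h1 : b ≤ r.1 := hrmax (b, e) hqP (by omega)
      have h2 : t.1 ≤ a := htmin (a, c) hpP (by omega)
      have hfd : f (a - c) = r.1 - t.1 := by
        simp [hf, PySem.Dict.getD_of_get?_eq_some _ _ hr, PySem.Dict.getD_of_get?_eq_some _ _ ht]
      have hsle : s ≤ f (a - c) := by rw [hsdef, hfd]; omega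
      have hdmem : (a - c) ∈ DM.keys := by
        refine (PySem.Dict.contains_iff_mem_keys DM (a - c)).mp ?_
        rw [PySem.Dict.contains_eq_isSome_get?, hr]
        rfl
      have hmm : f (a - c) * f (a - c) ∈ DM.keys.map (fun d => f d * f d) :=
        List.mem_map.mpr ⟨a - c, hdmem, rfl⟩
      have hle3 := (PySem.List.le_foldl_max (DM.keys.map (fun d => f d * f d)) 0).2 _ hmm
      have hle4 : s * s ≤ f (a - c) * f (a - c) := mul_self_le_mul_self (le_of_lt hpos) hsle
      exact le_trans hle4 hle3
  exact le_antisymm upper lower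

-- ===== VERDICT (by name: the statement is the Claim_ definition above) =====
theorem maximizeSquareArea_spec : Claim_equal_maximizeSquareArea := by
  intro m n hF vF _
  show maximizeSquareArea m n hF vF = maximizeSquareArea_alt m n hF vF
  unfold maximizeSquareArea maximizeSquareArea_alt
  dsimp only
  rw [pvFoldl_nested]
  rw [pvFoldl_pair (α := Int × Int) _ (fun dm p => pvUpdMax dm p.1 p.2)
      (fun dm p => pvUpdMin dm p.1 p.2)]
  dsimp only
  rw [pvDMax_def, pvDMin_def, pvCore, pvS_def]
  by_cases hz : pvS (PySem.Set.add (PySem.Set.add (PySem.Set.ofList hF) 1) m)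
      (PySem.Set.add (PySem.Set.add (PySem.Set.ofList vF) 1) n) = 0
  · simp [hz]
  · have hnz : pvS (PySem.Set.add (PySem.Set.add (PySem.Set.ofList hF) 1) m)
        (PySem.Set.add (PySem.Set.add (PySem.Set.ofList vF) 1) n) *
        pvS (PySem.Set.add (PySem.Set.add (PySem.Set.ofList hF) 1) m)
        (PySem.Set.add (PySem.Set.add (PySem.Set.ofList vF) 1) n) ≠ 0 := mul_ne_zero hz hz
    simp [hz, hnz]
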